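-- pv_equiv track=rewrite | github.com/Alperenlcr/QR_and_Symbol_Detection | main.py | find_longest_continuous_subarray_mid
-- ===== SOURCE A (Python) =====
-- def find_longest_continuous_subarray_mid(arr):
--     max_length = 0
--     current_length = 0
--     start_index = 0
--     end_index = 0
--
--     for i in range(1, len(arr)):
--         if arr[i] == arr[i - 1] + 1:
--             current_length += 1
--         else:
--             current_length = 0
--
--         if current_length > max_length:
--             max_length = current_length
--             start_index = i - current_length
--             end_index = i
--
--     longest_subarray = arr[start_index:end_index + 1]
--     return longest_subarray[len(longest_subarray)//2]
-- ===== SOURCE B (Python) =====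
-- def find_longest_continuous_subarray_mid(arr):
--     # One pass splitting arr into maximal consecutive-increment runs,
--     # then pick the first longest run and return its middle element.
--     runs = []  # (start index, length) of each maximal run
--     n = len(arr)
--     i = 0
--     while i < n:
--         j = i + 1
--         while j < n and arr[j] == arr[j - 1] + 1:
--             j += 1
--         runs.append((i, j - i))
--         i = j
--     best_start, best_len = max(runs, key=lambda r: r[1])
--     return arr[best_start + best_len // 2]
-- ===== Notes on version B (the rewrite author's own statement) =====
-- stated objective: alternative
-- what changed: Replaces the single index loop that maintains a running best (max_length/current_length/start/end) plus a final slice with a two-phase decomposition: one pass splits the array into maximal consecutive-increment runs recorded as (start, length), then max(runs, key=length) picks the first longest run and the answer is read directly at arr[start + length//2].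
import Mathlib
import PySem

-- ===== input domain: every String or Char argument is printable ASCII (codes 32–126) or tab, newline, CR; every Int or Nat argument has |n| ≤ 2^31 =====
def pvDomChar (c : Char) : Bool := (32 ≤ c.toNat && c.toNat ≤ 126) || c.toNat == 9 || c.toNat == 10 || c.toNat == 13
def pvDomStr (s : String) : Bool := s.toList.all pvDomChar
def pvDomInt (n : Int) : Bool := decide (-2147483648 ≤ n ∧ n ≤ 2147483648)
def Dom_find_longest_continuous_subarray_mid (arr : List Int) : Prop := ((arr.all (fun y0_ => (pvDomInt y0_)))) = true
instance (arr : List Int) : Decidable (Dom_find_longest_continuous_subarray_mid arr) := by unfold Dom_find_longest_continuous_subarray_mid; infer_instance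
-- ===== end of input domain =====

-- B replaces A's single running-best index loop by a two-phase decomposition (split into
-- maximal runs, then max-by-length); same O(n) cost, objective: alternative structure.

-- ===== PORT A =====
-- A's loop body (the state is (max_length, current_length, start_index, end_index))
def pvStepA (arr : List Int) (st : Int × Int × Int × Int) (i : Int) : Int × Int × Int × Int :=
  let c' := if PySem.List.pyGetD arr i 0 = PySem.List.pyGetD arr (i - 1) 0 + 1 then st.2.1 + 1 else 0
  if st.1 < c' then (c', c', i - c', i) else (st.1, c', st.2.2.1, st.2.2.2)

def find_longest_continuous_subarray_mid (arr : List Int) : Int :=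
  let st := (PySem.List.pyRange 1 (arr.length : Int) 1).foldl (pvStepA arr) (0, 0, 0, 0)
  let sub := PySem.List.slice arr (some st.2.2.1) (some (st.2.2.2 + 1))
  -- Python indexes sub[len(sub)//2]; on arr = [] this is an IndexError (excluded by Pre_)
  PySem.List.pyGetD sub (PySem.Int.floordiv (sub.length : Int) 2) 0

-- ===== PORT B =====
-- inner while loop of Source B: advance j while arr[j] == arr[j-1] + 1
def pvRunEnd (arr : List Int) (j : Int) : Int :=
  if h : j < (arr.length : Int) ∧
      PySem.List.pyGetD arr j 0 = PySem.List.pyGetD arr (j - 1) 0 + 1 then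
    pvRunEnd arr (j + 1)
  else j
termination_by ((arr.length : Int) - j).toNat
decreasing_by omega

theorem pvRunEnd_ge (arr : List Int) (j : Int) : j ≤ pvRunEnd arr j := by
  induction j using pvRunEnd.induct (arr := arr) with
  | case1 j h ih => rw [pvRunEnd, dif_pos h]; omega
  | case2 j h => rw [pvRunEnd, dif_neg h]

-- outer while loop of Source B: collect the runs (start, length)
def pvBuildRuns (arr : List Int) (i : Int) : List (Int × Int) :=
  if h : i < (arr.length : Int) then
    (i, pvRunEnd arr (i + 1) - i) :: pvBuildRuns arr (pvRunEnd arr (i + 1))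
  else []
termination_by ((arr.length : Int) - i).toNat
decreasing_by have := pvRunEnd_ge arr (i + 1); omega

def find_longest_continuous_subarray_mid_alt (arr : List Int) : Int :=
  let runs := pvBuildRuns arr 0
  match PySem.List.max? runs (fun r => r.2) with
  | some (s, l) => PySem.List.pyGetD arr (s + PySem.Int.floordiv l 2) 0
  | none => 0  -- max([]) raises ValueError in Python; only reached for arr = [], excluded by Pre_

-- ===== PRECONDITION & SPEC =====
-- Pre_ excludes only the empty list, on which A raises IndexError (and B raises ValueError).
def Pre_find_longest_continuous_subarray_mid (arr : List Int) : Prop := arr ≠ []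
instance (arr : List Int) : Decidable (Pre_find_longest_continuous_subarray_mid arr) := by
  unfold Pre_find_longest_continuous_subarray_mid; infer_instance

def pvWitness_find_longest_continuous_subarray_mid : List Int := [4, 1, 2, 3, 9]

def Spec_find_longest_continuous_subarray_mid (arr : List Int) (out : Int) : Prop := out = find_longest_continuous_subarray_mid_alt arr
instance (arr : List Int) (out : Int) : Decidable (Spec_find_longest_continuous_subarray_mid arr out) := by unfold Spec_find_longest_continuous_subarray_mid; infer_instance

-- ===== CLAIM (what is proved, stated in full; the proofs are below) =====
def Claim_equal_find_longest_continuous_subarray_mid : Prop := ∀ (arr : List Int), Dom_find_longest_continuous_subarray_mid arr → Pre_find_longest_continuous_subarray_mid arr → Spec_find_longest_continuous_subarray_mid arr (find_longest_continuous_subarray_mid arr)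

-- ===== LEMMAS AND PROOFS =====

-- the effect of one run on A's best-so-far triple (max_length, start, end)
def pvUpd (t : Int × Int × Int) (r : Int × Int) : Int × Int × Int :=
  if t.1 < r.2 - 1 then (r.2 - 1, r.1, r.1 + r.2 - 1) else t

theorem pvRunEnd_le (arr : List Int) (j : Int) (hj : j ≤ (arr.length : Int)) :
    pvRunEnd arr j ≤ (arr.length : Int) := by
  induction j using pvRunEnd.induct (arr := arr) with
  | case1 j h ih => rw [pvRunEnd, dif_pos h]; exact ih (by omega)
  | case2 j h => rw [pvRunEnd, dif_neg h]; exact hj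

theorem pvRunEnd_interior (arr : List Int) (j : Int) (k : Int)
    (h1 : j ≤ k) (h2 : k < pvRunEnd arr j) :
    PySem.List.pyGetD arr k 0 = PySem.List.pyGetD arr (k - 1) 0 + 1 := by
  induction j using pvRunEnd.induct (arr := arr) with
  | case1 j h ih =>
      rw [pvRunEnd, dif_pos h] at h2
      rcases eq_or_lt_of_le h1 with rfl | hlt
      · exact h.2
      · exact ih (by omega) h2
  | case2 j h => rw [pvRunEnd, dif_neg h] at h2; omega

theorem pvRunEnd_stop (arr : List Int) (j : Int)
    (h : pvRunEnd arr j < (arr.length : Int)) :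
    ¬ PySem.List.pyGetD arr (pvRunEnd arr j) 0
        = PySem.List.pyGetD arr (pvRunEnd arr j - 1) 0 + 1 := by
  induction j using pvRunEnd.induct (arr := arr) with
  | case1 j hc ih => rw [pvRunEnd, dif_pos hc] at h ⊢; exact ih h
  | case2 j hc =>
      rw [pvRunEnd, dif_neg hc] at h ⊢
      intro he; exact hc ⟨h, he⟩

theorem pvBuildRuns_wf (arr : List Int) (i : Int) :
    0 ≤ i → ∀ r ∈ pvBuildRuns arr i, i ≤ r.1 ∧ 1 ≤ r.2 ∧ r.1 + r.2 ≤ (arr.length : Int) := by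
  induction i using pvBuildRuns.induct (arr := arr) with
  | case1 i h ih =>
      intro hi r hr
      rw [pvBuildRuns, dif_pos h] at hr
      have hge := pvRunEnd_ge arr (i + 1)
      have hle := pvRunEnd_le arr (i + 1) (by omega)
      rcases List.mem_cons.mp hr with rfl | hr
      · simp; omega
      · have := ih (by omega) r hr; omega
  | case2 i h => intro hi r hr; rw [pvBuildRuns, dif_neg h] at hr; simp at hr
  
-- A's fold across the interior of one maximal run [s, j)
theorem pvRunFold (arr : List Int) (s j : Int)
    (hrun : ∀ k : Int, s < k → k < j →
      PySem.List.pyGetD arr k 0 = PySem.List.pyGetD arr (k - 1) 0 + 1) :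
    ∀ (d m sb eb : Int), 0 ≤ d → s + 1 + d ≤ j →
      (d ≤ m ∨ (m = d ∧ sb = s ∧ eb = s + d)) →
    (PySem.List.pyRange (s + 1 + d) j 1).foldl (pvStepA arr) (m, d, sb, eb)
      = ((if m < j - s - 1 then j - s - 1 else m), j - s - 1,
         if m < j - s - 1 then s else sb,
         if m < j - s - 1 then j - 1 else eb) := by
  suffices h : ∀ (fuel : Nat) (d m sb eb : Int), (j - (s + 1 + d)).toNat ≤ fuel →
      0 ≤ d → s + 1 + d ≤ j → (d ≤ m ∨ (m = d ∧ sb = s ∧ eb = s + d)) →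
      (PySem.List.pyRange (s + 1 + d) j 1).foldl (pvStepA arr) (m, d, sb, eb)
        = ((if m < j - s - 1 then j - s - 1 else m), j - s - 1,
           if m < j - s - 1 then s else sb,
           if m < j - s - 1 then j - 1 else eb) by
    intro d m sb eb hd hdj hinv
    exact h (j - (s + 1 + d)).toNat d m sb eb le_rfl hd hdj hinv
  intro fuel
  induction fuel with
  | zero =>
      intro d m sb eb hfuel hd hdj hinv
      have hje : j = s + 1 + d := by omega
      rw [PySem.List.pyRange_one_eq_nil (by omega), List.foldl_nil]
      simp only [Prod.mk.injEq]
      split_ifs <;> omega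
  | succ fuel ih =>
      intro d m sb eb hfuel hd hdj hinv
      rcases eq_or_lt_of_le hdj with hje | hlt
      · rw [← hje, PySem.List.pyRange_one_eq_nil le_rfl, List.foldl_nil]
        simp only [Prod.mk.injEq]
        split_ifs <;> omega
      · rw [PySem.List.pyRange_one_cons hlt, List.foldl_cons]
        have hcond := hrun (s + 1 + d) (by omega) (by omega)
        simp only [pvStepA, if_pos hcond]
        by_cases hm : m < d + 1
        · rw [if_pos hm]
          rw [show s + 1 + d + 1 = s + 1 + (d + 1) from by ring]
          rw [ih (d + 1) (d + 1) (s + 1 + d - (d + 1)) (s + 1 + d) (by omega) (by omega)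
                (by omega) (Or.inr ⟨rfl, by omega, by omega⟩)]
          simp only [Prod.mk.injEq]
          split_ifs <;> exact ⟨by omega, trivial, by omega, by omega⟩
        · rw [if_neg hm]
          rw [show s + 1 + d + 1 = s + 1 + (d + 1) from by ring]
          exact ih (d + 1) m sb eb (by omega) (by omega) (by omega) (Or.inl (by omega))

-- A's fold from a run boundary equals pvUpd folded over the runs
-- (projections 1, 3, 4 of the state: max_length, start_index, end_index)
theorem pvOuter (arr : List Int) (i : Int) : 0 ≤ i → ∀ (m sb eb : Int), 0 ≤ m →
    ((((PySem.List.pyRange (i + 1) (arr.length : Int) 1).foldl (pvStepA arr) (m, 0, sb, eb)).1,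
      ((PySem.List.pyRange (i + 1) (arr.length : Int) 1).foldl (pvStepA arr) (m, 0, sb, eb)).2.2.1,
      ((PySem.List.pyRange (i + 1) (arr.length : Int) 1).foldl (pvStepA arr) (m, 0, sb, eb)).2.2.2))
      = (pvBuildRuns arr i).foldl pvUpd (m, sb, eb) := by
  induction i using pvBuildRuns.induct (arr := arr) with
  | case1 i h ih =>
      intro hi m sb eb hm
      rw [pvBuildRuns, dif_pos h]
      have hge := pvRunEnd_ge arr (i + 1)
      have hle := pvRunEnd_le arr (i + 1) (by omega)
      set j := pvRunEnd arr (i + 1) with hj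
      have hrun : ∀ k : Int, i < k → k < j →
          PySem.List.pyGetD arr k 0 = PySem.List.pyGetD arr (k - 1) 0 + 1 := by
        intro k hk1 hk2
        exact pvRunEnd_interior arr (i + 1) k (by omega) (by rw [← hj]; exact hk2)
      have hrf := pvRunFold arr i j hrun 0 m sb eb le_rfl (by omega) (Or.inl hm)
      simp only [add_zero] at hrf
      have hupd : pvUpd (m, sb, eb) (i, j - i)
          = ((if m < j - i - 1 then j - i - 1 else m),
             (if m < j - i - 1 then i else sb),
             (if m < j - i - 1 then j - 1 else eb)) := by
        simp only [pvUpd]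
        split_ifs
        · simp only [Prod.mk.injEq]; exact ⟨trivial, trivial, by omega⟩
        · rfl
      rw [PySem.List.pyRange_one_append (i + 1) j ((arr.length : Int)) (by omega) (by omega),
          List.foldl_append, hrf]
      by_cases hjn : j < (arr.length : Int)
      · rw [PySem.List.pyRange_one_cons hjn, List.foldl_cons]
        have hstop : ¬ PySem.List.pyGetD arr j 0 = PySem.List.pyGetD arr (j - 1) 0 + 1 := by
          rw [hj]; exact pvRunEnd_stop arr (i + 1) (by rw [← hj]; exact hjn)
        simp only [pvStepA, if_neg hstop]
        rw [if_neg (by split_ifs <;> omega : ¬ ((if m < j - i - 1 then j - i - 1 else m) < (0:Int)))]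
        rw [ih (by omega) (if m < j - i - 1 then j - i - 1 else m)
              (if m < j - i - 1 then i else sb) (if m < j - i - 1 then j - 1 else eb)
              (by split_ifs <;> omega)]
        rw [List.foldl_cons, hupd]
      · rw [PySem.List.pyRange_one_eq_nil (by omega), List.foldl_nil]
        rw [show pvBuildRuns arr j = [] from by rw [pvBuildRuns, dif_neg (by omega)]]
        rw [List.foldl_cons, List.foldl_nil, hupd]
  | case2 i h =>
      intro hi m sb eb hm
      rw [pvBuildRuns, dif_neg h, PySem.List.pyRange_one_eq_nil (by omega),
          List.foldl_nil, List.foldl_nil]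

-- folding pvUpd is the same as folding Python's first-max selection
theorem pvSel (runs : List (Int × Int)) : ∀ (b : Int × Int),
    runs.foldl pvUpd (b.2 - 1, b.1, b.1 + b.2 - 1)
      = ((runs.foldl (fun acc x => if acc.2 < x.2 then x else acc) b).2 - 1,
         (runs.foldl (fun acc x => if acc.2 < x.2 then x else acc) b).1,
         (runs.foldl (fun acc x => if acc.2 < x.2 then x else acc) b).1
           + (runs.foldl (fun acc x => if acc.2 < x.2 then x else acc) b).2 - 1) := by
  induction runs with
  | nil => intro b; rfl
  | cons r t ih =>
      intro b
      simp only [List.foldl_cons, pvUpd]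
      by_cases h : b.2 < r.2
      · rw [if_pos (by omega), if_pos h]; exact ih r
      · rw [if_neg (by omega), if_neg h]; exact ih b

theorem pvMaxSome : ∀ (t : List (Int × Int)) (b : Int × Int),
    PySem.List.max? (b :: t) (fun r => r.2)
      = some (List.foldl (fun acc x => if acc.2 < x.2 then x else acc) b t) := by
  intro t
  induction t with
  | nil => intro b; rfl
  | cons x t ih =>
      intro b
      have step : PySem.List.max? (b :: x :: t) (fun r : Int × Int => r.2)
          = PySem.List.max? ((if b.2 < x.2 then x else b) :: t) (fun r => r.2) := by
        simp only [PySem.List.max?, List.foldl_cons]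
        by_cases h : b.2 < x.2 <;> simp [h]
      rw [step, ih, List.foldl_cons]

-- both ports read the answer at index start + length // 2 of the chosen run
theorem pvFinal (arr : List Int) (s l : Int) (hs : 0 ≤ s) (hl : 1 ≤ l)
    (hsl : s + l ≤ (arr.length : Int)) :
    PySem.List.pyGetD (PySem.List.slice arr (some s) (some (s + l - 1 + 1)))
        (PySem.Int.floordiv (((PySem.List.slice arr (some s) (some (s + l - 1 + 1))).length : Int)) 2) 0
      = PySem.List.pyGetD arr (s + PySem.Int.floordiv l 2) 0 := by
  obtain ⟨a, rfl⟩ : ∃ a : Nat, s = (a : Int) := ⟨s.toNat, (Int.toNat_of_nonneg hs).symm⟩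
  obtain ⟨b, rfl⟩ : ∃ b : Nat, l = (b : Int) := ⟨l.toNat, (Int.toNat_of_nonneg (by omega)).symm⟩
  have hb : 1 ≤ b := by exact_mod_cast hl
  have hab : a + b ≤ arr.length := by exact_mod_cast hsl
  have h1 : (a : Int) + b - 1 + 1 = ((a + b : Nat) : Int) := by push_cast; ring
  rw [h1, PySem.List.slice_natCast]
  have hlen : ((arr.drop a).take (a + b - a)).length = b := by
    simp only [List.length_take, List.length_drop]
    omega
  rw [hlen]
  have h2 : PySem.Int.floordiv ((b : Nat) : Int) 2 = ((b / 2 : Nat) : Int) := by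
    exact_mod_cast PySem.Int.floordiv_natCast b 2
  rw [h2]
  have h3 : (a : Int) + ((b / 2 : Nat) : Int) = ((a + b / 2 : Nat) : Int) := by push_cast; ring
  rw [h3, PySem.List.pyGetD_natCast, PySem.List.pyGetD_natCast]
  have hb2 : b / 2 < b := Nat.div_lt_self (by omega) (by omega)
  have hba : a + b - a = b := by omega
  rw [hba]
  rw [List.getD_eq_getElem?_getD, List.getD_eq_getElem?_getD,
      List.getElem?_take_of_lt hb2, List.getElem?_drop]

-- ===== VERDICT (by name: the statement is the Claim_ definition above) =====
theorem find_longest_continuous_subarray_mid_spec : Claim_equal_find_longest_continuous_subarray_mid := by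
  intro arr hdom hpre
  unfold Spec_find_longest_continuous_subarray_mid
  have hne : arr ≠ [] := hpre
  have hn : 0 < arr.length := List.length_pos_of_ne_nil hne
  have hn' : (0:Int) < (arr.length : Int) := by exact_mod_cast hn
  have hge := pvRunEnd_ge arr (0 + 1)
  have hle := pvRunEnd_le arr (0 + 1) (by omega)
  have hruns : pvBuildRuns arr 0
      = (0, pvRunEnd arr (0 + 1) - 0) :: pvBuildRuns arr (pvRunEnd arr (0 + 1)) := by
    conv_lhs => rw [pvBuildRuns]
    rw [dif_pos hn']
  set j1 := pvRunEnd arr (0 + 1) with hj1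
  set r := (pvBuildRuns arr j1).foldl
      (fun acc x => if acc.2 < x.2 then x else acc) ((0:Int), j1 - 0) with hr
  have hmax : PySem.List.max? (pvBuildRuns arr 0) (fun x => x.2) = some r := by
    rw [hruns, pvMaxSome, hr]
  have hrmem : r ∈ pvBuildRuns arr 0 := PySem.List.max?_mem hmax
  have hwf := pvBuildRuns_wf arr 0 le_rfl r hrmem
  have houter := pvOuter arr 0 le_rfl 0 0 0 le_rfl
  rw [hruns, List.foldl_cons] at houter
  have hsel0 : pvUpd (0, 0, 0) ((0:Int), j1 - 0)
      = ((0, j1 - 0).2 - 1, ((0:Int), j1 - 0).1, ((0:Int), j1 - 0).1 + (0, j1 - 0).2 - 1) := by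
    simp only [pvUpd]
    split_ifs
    · simp only
    · simp only [Prod.mk.injEq]; exact ⟨by omega, trivial, by omega⟩
  rw [hsel0, pvSel (pvBuildRuns arr j1) ((0:Int), j1 - 0), ← hr] at houter
  obtain ⟨rs, rl⟩ := r
  have hwf1 : 0 ≤ rs := hwf.1
  have hwf2 : 1 ≤ rl := hwf.2.1
  have hwf3 : rs + rl ≤ (arr.length : Int) := hwf.2.2
  simp only [zero_add, Prod.mk.injEq] at houter
  obtain ⟨e1, e2, e3⟩ := houter
  simp only [find_longest_continuous_subarray_mid, find_longest_continuous_subarray_mid_alt, hmax]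
  rw [e2, e3]
  exact pvFinal arr rs rl hwf1 hwf2 hwf3
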